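-- pv_equiv track=rewrite | github.com/Isak-toast/Algorithm | Programmers/pccp/test_6.py | solution
-- ===== SOURCE A (Python) =====
-- import heapq
--
-- def solution(ability, number):
--     answer = 0
--     pQ = []
--     for x in ability:
--         heapq.heappush(pQ, x)
--
--     for i in range(number):
--         a = heapq.heappop(pQ)
--         b = heapq.heappop(pQ)
--         heapq.heappush(pQ, a+b)
--         heapq.heappush(pQ, a+b)
--     answer = sum(pQ)
--     return answer
-- ===== SOURCE B (Python) =====
-- def solution(ability, number):
--     pool = list(ability)
--     for _ in range(number):
--         a = pool.pop(pool.index(min(pool)))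
--         b = pool.pop(pool.index(min(pool)))
--         pool.append(a + b)
--         pool.append(a + b)
--     return sum(pool)
-- ===== Notes on version B (the rewrite author's own statement) =====
-- stated objective: simpler
-- what changed: Replaces the binary heap (heapq push/pop with sift-up/sift-down) by a plain list with a linear min-scan: each round pops the two smallest by min()+index()+pop() and appends their sum twice; only the two smallest values matter per round, so the final sum is identical.
import Mathlib
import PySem

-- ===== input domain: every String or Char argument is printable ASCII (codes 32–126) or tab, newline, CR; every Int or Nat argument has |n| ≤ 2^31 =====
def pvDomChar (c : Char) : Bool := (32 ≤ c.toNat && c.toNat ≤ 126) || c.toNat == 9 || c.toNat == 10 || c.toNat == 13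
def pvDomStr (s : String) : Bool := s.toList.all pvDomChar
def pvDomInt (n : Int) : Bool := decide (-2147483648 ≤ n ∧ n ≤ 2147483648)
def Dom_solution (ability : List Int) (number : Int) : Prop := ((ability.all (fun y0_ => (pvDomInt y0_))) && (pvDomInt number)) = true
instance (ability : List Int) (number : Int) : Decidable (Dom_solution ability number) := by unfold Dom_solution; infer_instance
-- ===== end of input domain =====

-- B replaces A's binary heap (heapq sift-up/sift-down) by a plain list with a linear
-- min-scan per round; objective: simpler. Equal on all inputs satisfying Pre_solution.


-- ===== PORT A =====
-- heapq._siftdown(heap, startpos, pos): moves newitem (Python reads it as heap[pos]) up.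
def siftdownAux (heap : List Int) (startpos pos : Nat) (newitem : Int) : List Int :=
  if _h : startpos < pos then
    let parentpos := (pos - 1) / 2
    let parent := heap.getD parentpos 0
    if newitem < parent then
      siftdownAux (heap.set pos parent) startpos parentpos newitem
    else heap.set pos newitem
  else heap.set pos newitem
termination_by pos
decreasing_by omega

def siftdown (heap : List Int) (startpos pos : Nat) : List Int :=
  siftdownAux heap startpos pos (heap.getD pos 0)  -- newitem = heap[pos]

-- heapq._siftup(heap, pos): hole-down loop, then the trailing _siftdown call.
def siftupLoop (heap : List Int) (endpos pos : Nat) : List Int × Nat :=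
  let childpos := 2 * pos + 1
  if _h : childpos < endpos then
    let rightpos := childpos + 1
    let childpos2 :=
      if rightpos < endpos ∧ ¬ (heap.getD childpos 0 < heap.getD rightpos 0) then rightpos
      else childpos
    siftupLoop (heap.set pos (heap.getD childpos2 0)) endpos childpos2
  else (heap, pos)
termination_by endpos - pos
decreasing_by
  simp only [childpos2, childpos] at *
  split <;> omega

def siftup (heap : List Int) (pos : Nat) : List Int :=
  let endpos := heap.length
  let newitem := heap.getD pos 0
  let r := siftupLoop heap endpos pos
  siftdown (r.1.set r.2 newitem) pos r.2

-- heap.append(item); _siftdown(heap, 0, len(heap)-1)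
def heappush (heap : List Int) (item : Int) : List Int :=
  siftdown (heap ++ [item]) 0 heap.length

-- heapq.heappop; none = IndexError ("index out of range" from heap.pop())
def heappop (heap : List Int) : Option (Int × List Int) :=
  match heap.getLast? with
  | none => none
  | some lastelt =>
    let rest := heap.dropLast
    if rest.isEmpty then some (lastelt, rest)
    else
      let returnitem := rest.getD 0 0
      some (returnitem, siftup (rest.set 0 lastelt) 0)

-- one iteration of A's for-loop body; none = IndexError from a heappop
def stepA (h : List Int) : Option (List Int) :=
  match heappop h with
  | none => none
  | some (a, h1) =>
    match heappop h1 with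
    | none => none
    | some (b, h2) => some (heappush (heappush h2 (a + b)) (a + b))

def loopA : Nat → List Int → Option (List Int)
  | 0, h => some h
  | n + 1, h => match stepA h with | none => none | some h' => loopA n h'

def solution (ability : List Int) (number : Int) : Int :=
  let pQ := ability.foldl (fun h x => heappush h x) []
  match loopA number.toNat pQ with
  | none => 0          -- unreachable under Pre_solution (Python raises IndexError there)
  | some q => q.sum

-- ===== PORT B =====
-- pool.pop(pool.index(min(pool))); none = ValueError/IndexError (excluded by Pre_solution)
def takeMin (pool : List Int) : Option (Int × List Int) :=
  match PySem.List.min? pool (fun x => x) with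
  | none => none
  | some m =>
    match PySem.List.index? pool m with
    | none => none
    | some i =>
      match PySem.List.pop? pool (i : Int) with
      | none => none
      | some r => some r

-- one iteration of B's for-loop body: pop the two smallest, append their sum twice
def stepB (pool : List Int) : Option (List Int) :=
  match takeMin pool with
  | none => none
  | some (a, p1) =>
    match takeMin p1 with
    | none => none
    | some (b, p2) => some (p2 ++ [a + b] ++ [a + b])

def loopB : Nat → List Int → Option (List Int)
  | 0, p => some p
  | n + 1, p => match stepB p with | none => none | some p' => loopB n p'

def solution_alt (ability : List Int) (number : Int) : Int :=
  match loopB number.toNat ability with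
  | none => 0          -- unreachable under Pre_solution
  | some p => p.sum

-- ===== PRECONDITION & SPEC =====
-- Exactly the inputs on which Python A returns: with number ≥ 1 the heap must hold at
-- least 2 elements (its size is invariant across rounds), otherwise heappop raises
-- IndexError. Nothing else is excluded.
def Pre_solution (ability : List Int) (number : Int) : Prop :=
  0 < number → 2 ≤ ability.length
instance (ability : List Int) (number : Int) : Decidable (Pre_solution ability number) := by
  unfold Pre_solution; infer_instance

def pvWitness_solution : List Int × Int := ([3, 1, 2], 2)

def Spec_solution (ability : List Int) (number : Int) (out : Int) : Prop := out = solution_alt ability number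
instance (ability : List Int) (number : Int) (out : Int) : Decidable (Spec_solution ability number out) := by unfold Spec_solution; infer_instance

-- ===== CLAIM (what is proved, stated in full; the proofs are below) =====
def Claim_equal_solution : Prop := ∀ (ability : List Int) (number : Int), Dom_solution ability number → Pre_solution ability number → Spec_solution ability number (solution ability number)

-- ===== LEMMAS AND PROOFS =====

theorem getD_set_self (l : List Int) (i : Nat) (a : Int) (h : i < l.length) :
    (l.set i a).getD i 0 = a := by
  simp [List.getD_eq_getElem?_getD, h]

theorem getD_set_ne (l : List Int) (i j : Nat) (a : Int) (h : i ≠ j) :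
    (l.set i a).getD j 0 = l.getD j 0 := by
  simp [List.getD_eq_getElem?_getD, h]

theorem count_set (l : List Int) (i : Nat) (a y : Int) (h : i < l.length) :
    (l.set i a).count y + (if l.getD i 0 = y then 1 else 0)
      = l.count y + (if a = y then 1 else 0) := by
  induction l generalizing i with
  | nil => simp at h
  | cons x t ih =>
    cases i with
    | zero => simp [List.count_cons]; split_ifs <;> omega
    | succ n =>
      have := ih n (by simpa using h)
      simp only [List.set_cons_succ, List.count_cons, List.getD_cons_succ]
      split_ifs at * <;> omega

theorem swap_set_perm (l : List Int) (i j : Nat) (x : Int) (hij : i ≠ j)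
    (hi : i < l.length) (hj : j < l.length) :
    ((l.set i (l.getD j 0)).set j x).Perm (l.set i x) := by
  rw [List.perm_iff_count]
  intro y
  have h1 := count_set l i (l.getD j 0) y hi
  have h2 := count_set (l.set i (l.getD j 0)) j x y (by simpa using hj)
  have h3 := count_set l i x y hi
  rw [getD_set_ne l i j _ hij] at h2
  split_ifs at * <;> omega

def IsHeap (l : List Int) : Prop :=
  ∀ i, 0 < i → i < l.length → l.getD ((i - 1) / 2) 0 ≤ l.getD i 0

def InvD (l : List Int) (pos : Nat) : Prop :=
  (∀ i, 0 < i → i < l.length → i ≠ pos → (i - 1) / 2 ≠ pos →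
      l.getD ((i - 1) / 2) 0 ≤ l.getD i 0) ∧
  (∀ c, c < l.length → (c - 1) / 2 = pos → c ≠ pos → 0 < pos →
      l.getD ((pos - 1) / 2) 0 ≤ l.getD c 0) ∧
  (∀ c, c < l.length → (c - 1) / 2 = pos → c ≠ pos →
      l.getD pos 0 ≤ l.getD c 0)

theorem root_min (l : List Int) (h : IsHeap l) :
    ∀ i, i < l.length → l.getD 0 0 ≤ l.getD i 0 := by
  intro i
  induction i using Nat.strong_induction_on with
  | _ i ih =>
    intro hi
    rcases Nat.eq_zero_or_pos i with h0 | h0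
    · subst h0; exact le_refl _
    · exact le_trans (ih ((i - 1) / 2) (by omega) (by omega)) (h i h0 hi)

theorem invD_up (l : List Int) (pos : Nat) (h0 : 0 < pos) (hl : pos < l.length)
    (hI : InvD l pos) (hlt : l.getD pos 0 < l.getD ((pos - 1) / 2) 0) :
    InvD ((l.set pos (l.getD ((pos - 1) / 2) 0)).set ((pos - 1) / 2) (l.getD pos 0))
      ((pos - 1) / 2) := by
  obtain ⟨ha, hb, hc⟩ := hI
  set par := (pos - 1) / 2 with hpar
  have hparlt : par < pos := by omega
  have hparlen : par < l.length := by omega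
  set l' := (l.set pos (l.getD par 0)).set par (l.getD pos 0) with hl'
  have hlen' : l'.length = l.length := by simp [hl']
  have gpos : l'.getD pos 0 = l.getD par 0 := by
    rw [hl', getD_set_ne _ _ _ _ (by omega), getD_set_self _ _ _ hl]
  have gpar : l'.getD par 0 = l.getD pos 0 := by
    rw [hl', getD_set_self _ _ _ (by simpa using hparlen)]
  have gother : ∀ k, k ≠ pos → k ≠ par → l'.getD k 0 = l.getD k 0 := by
    intro k h1 h2
    rw [hl', getD_set_ne _ _ _ _ (by omega), getD_set_ne _ _ _ _ (by omega)]
  refine ⟨?_, ?_, ?_⟩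
  · -- (a) edges avoiding the new hole par
    intro i hi0 hilen hine hipar
    rw [hlen'] at hilen
    by_cases hip : i = pos
    · subst hip
      rw [gpos, gpar]  -- edge (par, pos): newitem ≤ old parent value
      exact le_of_lt hlt
    · by_cases hpp : (i - 1) / 2 = pos
      · -- i is a child of pos (other than the hole chain)
        rw [gother i hip (by omega), hpp, gpos]
        exact hb i (by omega) hpp hip h0
      · rw [gother i hip (by omega), gother _ hpp hipar]
        exact ha i hi0 hilen hip hpp
  · -- (b) grandparent bound for the new hole
    intro c hclen hcpar hcne hpos0
    rw [hlen'] at hclen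
    have hgp : (par - 1) / 2 ≠ pos := by omega
    have hgpne : (par - 1) / 2 ≠ par := by omega
    rw [gother _ hgp hgpne]
    have hgpe : l.getD ((par - 1) / 2) 0 ≤ l.getD par 0 :=
      ha par hpos0 hparlen (by omega) hgp
    by_cases hcp : c = pos
    · subst hcp
      rw [gpos]
      exact hgpe
    · rw [gother c hcp hcne]
      have h2 := ha c (by omega) hclen hcp (by rw [hcpar]; omega)
      rw [hcpar] at h2
      exact le_trans hgpe h2
  · -- (c) newitem ≤ children of the new hole
    intro c hclen hcpar hcne
    rw [hlen'] at hclen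
    rw [gpar]
    by_cases hcp : c = pos
    · subst hcp; rw [gpos]; exact le_of_lt hlt
    · rw [gother c hcp hcne]
      have h2 := ha c (by omega) hclen hcp (by rw [hcpar]; omega)
      rw [hcpar] at h2
      exact le_trans (le_of_lt hlt) h2

theorem invD_done (l : List Int) (pos : Nat) (hl : pos < l.length) (hI : InvD l pos)
    (hge : pos = 0 ∨ l.getD ((pos - 1) / 2) 0 ≤ l.getD pos 0) : IsHeap l := by
  obtain ⟨ha, _, hc⟩ := hI
  intro i hi0 hilen
  by_cases hip : i = pos
  · subst hip
    rcases hge with h0 | h0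
    · omega
    · exact h0
  · by_cases hpp : (i - 1) / 2 = pos
    · rw [hpp]; exact hc i hilen hpp hip
    · exact ha i hi0 hilen hip hpp

theorem siftdownAux_length (s : Nat) (x : Int) (heap : List Int) (pos : Nat) :
    (siftdownAux heap s pos x).length = heap.length := by
  induction heap, pos using siftdownAux.induct (startpos := s) (newitem := x) with
  | case1 heap pos h pp pr hlt ih =>
    have hlt' : x < heap.getD ((pos - 1) / 2) 0 := hlt
    have ih' : (siftdownAux (heap.set pos (heap.getD ((pos - 1) / 2) 0)) s ((pos - 1) / 2) x).length
        = (heap.set pos (heap.getD ((pos - 1) / 2) 0)).length := ih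
    rw [siftdownAux, dif_pos h, if_pos hlt', ih', List.length_set]
  | case2 heap pos h pp pr hlt =>
    have hlt' : ¬ x < heap.getD ((pos - 1) / 2) 0 := hlt
    rw [siftdownAux, dif_pos h, if_neg hlt', List.length_set]
  | case3 heap pos h =>
    rw [siftdownAux, dif_neg h, List.length_set]

theorem siftdownAux_perm (s : Nat) (x : Int) (heap : List Int) (pos : Nat)
    (hpos : pos < heap.length) :
    (siftdownAux heap s pos x).Perm (heap.set pos x) := by
  induction heap, pos using siftdownAux.induct (startpos := s) (newitem := x) with
  | case1 heap pos h pp pr hlt ih =>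
    have hlt' : x < heap.getD ((pos - 1) / 2) 0 := hlt
    have ih' : (siftdownAux (heap.set pos (heap.getD ((pos - 1) / 2) 0)) s ((pos - 1) / 2) x).Perm
        ((heap.set pos (heap.getD ((pos - 1) / 2) 0)).set ((pos - 1) / 2) x) :=
      ih (by show (_:Nat) < _; simp only [List.length_set]; omega)
    rw [siftdownAux, dif_pos h, if_pos hlt']
    exact ih'.trans (swap_set_perm heap pos ((pos - 1) / 2) x (by omega) hpos (by omega))
  | case2 heap pos h pp pr hlt =>
    have hlt' : ¬ x < heap.getD ((pos - 1) / 2) 0 := hlt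
    rw [siftdownAux, dif_pos h, if_neg hlt']
  | case3 heap pos h =>
    rw [siftdownAux, dif_neg h]

theorem siftdownAux_heap (x : Int) (heap : List Int) (pos : Nat) (hpos : pos < heap.length)
    (hI : InvD (heap.set pos x) pos) : IsHeap (siftdownAux heap 0 pos x) := by
  induction heap, pos using siftdownAux.induct (startpos := 0) (newitem := x) with
  | case1 heap pos h pp pr hlt ih =>
    have hlt' : x < heap.getD ((pos - 1) / 2) 0 := hlt
    rw [siftdownAux, dif_pos h, if_pos hlt']
    apply ih (by show (_:Nat) < _; simp only [List.length_set]; omega)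
    have hset : (heap.set pos x).set pos (heap.getD ((pos - 1) / 2) 0) =
        heap.set pos (heap.getD ((pos - 1) / 2) 0) := List.set_set ..
    have hpar : heap.getD ((pos - 1) / 2) 0 = (heap.set pos x).getD ((pos - 1) / 2) 0 :=
      (getD_set_ne heap pos ((pos - 1) / 2) x (by omega)).symm
    have hx : x = (heap.set pos x).getD pos 0 := (getD_set_self heap pos x hpos).symm
    have hstep := invD_up (heap.set pos x) pos (by omega) (by simpa using hpos) hI
      (by rw [← hpar, ← hx]; exact hlt')
    rw [← hpar, ← hx, hset] at hstep
    exact hstep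
  | case2 heap pos h pp pr hlt =>
    have hlt' : ¬ x < heap.getD ((pos - 1) / 2) 0 := hlt
    rw [siftdownAux, dif_pos h, if_neg hlt']
    apply invD_done (heap.set pos x) pos (by simpa using hpos) hI
    right
    rw [getD_set_self heap pos x hpos, getD_set_ne heap pos ((pos - 1) / 2) x (by omega)]
    omega
  | case3 heap pos h =>
    rw [siftdownAux, dif_neg h]
    exact invD_done (heap.set pos x) pos (by simpa using hpos) hI (Or.inl (by omega))

theorem getD_append_left (l t : List Int) (i : Nat) (h : i < l.length) :
    (l ++ t).getD i 0 = l.getD i 0 := by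
  simp [List.getD_eq_getElem?_getD, List.getElem?_append_left h]

theorem heappush_perm (h : List Int) (x : Int) : (heappush h x).Perm (h ++ [x]) := by
  unfold heappush siftdown
  have hlen : h.length < (h ++ [x]).length := by simp
  have hx : (h ++ [x]).getD h.length 0 = x := by
    simp [List.getD_eq_getElem?_getD]
  rw [hx]
  refine (siftdownAux_perm 0 x (h ++ [x]) h.length hlen).trans ?_
  have : (h ++ [x]).set h.length x = h ++ [x] := by
    rw [List.set_append_right _ _ (le_refl _)]
    simp
  rw [this]

theorem heappush_heap (h : List Int) (x : Int) (hh : IsHeap h) : IsHeap (heappush h x) := by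
  unfold heappush siftdown
  have hlen : h.length < (h ++ [x]).length := by simp
  have hx : (h ++ [x]).getD h.length 0 = x := by
    simp [List.getD_eq_getElem?_getD]
  rw [hx]
  apply siftdownAux_heap x (h ++ [x]) h.length hlen
  have hset : (h ++ [x]).set h.length x = h ++ [x] := by
    rw [List.set_append_right _ _ (le_refl _)]
    simp
  rw [hset]
  refine ⟨?_, ?_, ?_⟩
  · intro i hi0 hilen hine hipar
    have hi : i < h.length := by simp at hilen; omega
    rw [getD_append_left _ _ i hi, getD_append_left _ _ _ (by omega)]
    exact hh i hi0 hi
  · intro c hclen hcpar hcne hpos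
    simp at hclen
    omega
  · intro c hclen hcpar hcne
    simp at hclen
    omega

def InvU (l : List Int) (pos : Nat) : Prop :=
  (∀ i, 0 < i → i < l.length → i ≠ pos → (i - 1) / 2 ≠ pos →
      l.getD ((i - 1) / 2) 0 ≤ l.getD i 0) ∧
  (∀ c, c < l.length → (c - 1) / 2 = pos → c ≠ pos → 0 < pos →
      l.getD ((pos - 1) / 2) 0 ≤ l.getD c 0)

theorem siftupLoop_spec (endpos : Nat) : ∀ (heap : List Int) (pos : Nat),
    endpos = heap.length → pos < endpos → InvU heap pos →
    (siftupLoop heap endpos pos).1.length = heap.length ∧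
    (siftupLoop heap endpos pos).2 < endpos ∧
    endpos ≤ 2 * (siftupLoop heap endpos pos).2 + 1 ∧
    InvU (siftupLoop heap endpos pos).1 (siftupLoop heap endpos pos).2 ∧
    ∀ x, ((siftupLoop heap endpos pos).1.set (siftupLoop heap endpos pos).2 x).Perm
        (heap.set pos x) := by
  intro heap pos
  induction heap, pos using siftupLoop.induct (endpos := endpos) with
  | case1 heap pos cp h rp c2 ih =>
    intro he hp hI
    have hcp : cp = 2 * pos + 1 := rfl
    have hrp : rp = cp + 1 := rfl
    have hc2 : c2 = if rp < endpos ∧ ¬ heap.getD cp 0 < heap.getD rp 0 then rp else cp := rfl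
    have h' : cp < endpos := h
    have hc2b : c2 = cp ∨ c2 = rp := by rw [hc2]; split <;> simp
    have hc2end : c2 < endpos := by
      rw [hc2]; split
      next hcond => exact hcond.1
      next hcond => exact h'
    have hc2par : (c2 - 1) / 2 = pos := by
      rcases hc2b with h1 | h1 <;> rw [h1] <;> omega
    have hc2pos : pos < c2 := by rcases hc2b with h1 | h1 <;> omega
    have hcL : heap.getD c2 0 ≤ heap.getD cp 0 := by
      by_cases hcond : rp < endpos ∧ ¬ heap.getD cp 0 < heap.getD rp 0
      · rw [hc2, if_pos hcond]; exact le_of_not_gt hcond.2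
      · rw [hc2, if_neg hcond]
    have hcR : rp < endpos → heap.getD c2 0 ≤ heap.getD rp 0 := by
      intro hrplt
      by_cases hcond : rp < endpos ∧ ¬ heap.getD cp 0 < heap.getD rp 0
      · rw [hc2, if_pos hcond]
      · rw [hc2, if_neg hcond]
        by_contra hx
        exact hcond ⟨hrplt, fun hy => hx (le_of_lt hy)⟩
    have hmin : ∀ s, s < endpos → (s - 1) / 2 = pos → s ≠ pos →
        heap.getD c2 0 ≤ heap.getD s 0 := by
      intro s hs hspar hsne
      have hs2 : s = cp ∨ s = rp := by rw [hcp, hrp, hcp]; omega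
      rcases hs2 with h1 | h1 <;> subst h1
      · exact hcL
      · exact hcR hs
    have hlenpos : pos < heap.length := by omega
    have hg_self : (heap.set pos (heap.getD c2 0)).getD pos 0 = heap.getD c2 0 :=
      getD_set_self _ _ _ hlenpos
    have hg_ne : ∀ k, k ≠ pos → (heap.set pos (heap.getD c2 0)).getD k 0 = heap.getD k 0 :=
      fun k hk => getD_set_ne _ _ _ _ (fun hh => hk hh.symm)
    have hI' : InvU (heap.set pos (heap.getD c2 0)) c2 := by
      constructor
      · intro i hi0 hilen hine hipar
        rw [List.length_set] at hilen
        by_cases hip : i = pos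
        · subst hip
          have hq : (i - 1) / 2 ≠ i := by omega
          rw [hg_ne _ hq, hg_self]
          have := hI.2 c2 (by omega) hc2par (by omega) hi0
          exact this
        · rw [hg_ne i hip]
          by_cases hpp : (i - 1) / 2 = pos
          · rw [hpp, hg_self]
            exact hmin i (by omega) hpp hip
          · rw [hg_ne _ hpp]
            exact hI.1 i hi0 hilen hip hpp
      · intro cc hcclen hccpar hccne _
        rw [List.length_set] at hcclen
        have hccpos : c2 < cc := by omega
        rw [hc2par, hg_self, hg_ne cc (by omega)]
        have := hI.1 cc (by omega) hcclen (by omega) (by rw [hccpar]; omega)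
        rw [hccpar] at this
        exact this
    have hrec := ih (by simp [← he]) hc2end hI'
    have hunf : siftupLoop heap endpos pos =
        siftupLoop (heap.set pos (heap.getD c2 0)) endpos c2 := by
      rw [siftupLoop, dif_pos h']; rfl
    rw [hunf]
    refine ⟨by rw [hrec.1]; simp, hrec.2.1, hrec.2.2.1, hrec.2.2.2.1, ?_⟩
    intro x
    exact (hrec.2.2.2.2 x).trans (swap_set_perm heap pos c2 x (by omega) hlenpos (by omega))
  | case2 heap pos cp h =>
    intro he hp hI
    have hunf : siftupLoop heap endpos pos = (heap, pos) := by
      rw [siftupLoop, dif_neg h]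
    rw [hunf]
    exact ⟨rfl, hp, by have : ¬ (2 * pos + 1 < endpos) := h; omega, hI, fun x => List.Perm.refl _⟩

theorem set_getD_self (l : List Int) (i : Nat) (h : i < l.length) :
    l.set i (l.getD i 0) = l := by
  apply List.ext_getElem?
  intro n
  by_cases hn : n = i
  · subst hn
    rw [List.getElem?_set_self' ]
    simp [List.getD_eq_getElem?_getD, h, List.getElem?_eq_getElem h]
  · rw [List.getElem?_set_ne (fun hh => hn hh.symm)]

theorem siftup_spec (l0 : List Int) (hne : 0 < l0.length) (hI : InvU l0 0) :
    (siftup l0 0).length = l0.length ∧ IsHeap (siftup l0 0) ∧ (siftup l0 0).Perm l0 := by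
  obtain ⟨hlen, hlt, hleaf, hIu, hperm⟩ := siftupLoop_spec l0.length l0 0 rfl hne hI
  set r := siftupLoop l0 l0.length 0 with hr
  set newitem := l0.getD 0 0 with hnew
  have hr2len : r.2 < r.1.length := by omega
  have hgd : (r.1.set r.2 newitem).getD r.2 0 = newitem := getD_set_self _ _ _ hr2len
  have hunf : siftup l0 0 = siftdownAux (r.1.set r.2 newitem) 0 r.2 newitem := by
    show siftdownAux (r.1.set r.2 newitem) 0 r.2 ((r.1.set r.2 newitem).getD r.2 0)
      = siftdownAux (r.1.set r.2 newitem) 0 r.2 newitem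
    rw [hgd]
  rw [hunf]
  have hcollapse : (r.1.set r.2 newitem).set r.2 newitem = r.1.set r.2 newitem :=
    List.set_set ..
  have hsetlen : r.2 < (r.1.set r.2 newitem).length := by simpa using hr2len
  refine ⟨?_, ?_, ?_⟩
  · rw [siftdownAux_length]; simp [hlen]
  · apply siftdownAux_heap newitem _ r.2 hsetlen
    rw [hcollapse]
    refine ⟨?_, ?_, ?_⟩
    · intro i hi0 hilen hine hipar
      rw [List.length_set] at hilen
      rw [getD_set_ne _ _ _ _ (fun hh => hine hh.symm),
          getD_set_ne _ _ _ _ (fun hh => hipar hh.symm)]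
      exact hIu.1 i hi0 hilen hine hipar
    · intro c hclen hcpar hcne _
      rw [List.length_set, hlen] at hclen
      omega
    · intro c hclen hcpar hcne
      rw [List.length_set, hlen] at hclen
      omega
  · refine (siftdownAux_perm 0 newitem _ r.2 hsetlen).trans ?_
    rw [hcollapse]
    refine (hperm newitem).trans ?_
    rw [hnew, set_getD_self l0 0 hne]

theorem heappop_spec (h : List Int) (hh : IsHeap h) (hne : h ≠ []) :
    ∃ h', heappop h = some (h.getD 0 0, h') ∧ IsHeap h' ∧ h'.length + 1 = h.length ∧
      (h.getD 0 0 :: h').Perm h := by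
  obtain ⟨lastelt, hlast⟩ : ∃ x, h.getLast? = some x :=
    ⟨h.getLast hne, List.getLast?_eq_getLast hne⟩
  have hdl : h.dropLast.length = h.length - 1 := List.length_dropLast
  have hpos : 0 < h.length := List.length_pos_of_ne_nil hne
  have hunf : heappop h = (if h.dropLast.isEmpty then some (lastelt, h.dropLast)
      else some (h.dropLast.getD 0 0, siftup (h.dropLast.set 0 lastelt) 0)) := by
    unfold heappop
    rw [hlast]
  rw [hunf]
  by_cases hrest : h.dropLast.isEmpty
  · -- h = [lastelt]
    have h0 : h.dropLast.length = 0 := by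
      rw [List.isEmpty_iff] at hrest; simp [hrest]
    have hlen1 : h.length = 1 := by omega
    obtain ⟨a, ha⟩ : ∃ a, h = [a] := List.length_eq_one_iff.mp hlen1
    subst ha
    simp only [List.getLast?_singleton, Option.some_inj] at hlast
    subst hlast
    refine ⟨[], by simp [hrest], ?_, by simp, by simp⟩
    intro i hi0 hilen
    simp at hilen
  · rw [if_neg hrest]
    have hrlen : 0 < h.dropLast.length := by
      rw [List.isEmpty_iff] at hrest
      exact List.length_pos_of_ne_nil hrest
    have hlen2 : 2 ≤ h.length := by omega
    set l0 := h.dropLast.set 0 lastelt with hl0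
    have hl0len : l0.length = h.dropLast.length := by simp [hl0]
    have hdrop : ∀ k, k < h.dropLast.length → h.dropLast.getD k 0 = h.getD k 0 := by
      intro k hk
      rw [List.dropLast_eq_take]
      simp only [List.getD_eq_getElem?_getD, List.getElem?_take]
      rw [List.dropLast_eq_take] at hk
      simp only [List.length_take] at hk
      rw [if_pos (by omega)]
    have hIu : InvU l0 0 := by
      constructor
      · intro i hi0 hilen hine hipar
        rw [hl0len] at hilen
        rw [hl0, getD_set_ne _ _ _ _ (fun hh2 => hipar hh2.symm),
            getD_set_ne _ _ _ _ (fun hh2 => hine hh2.symm),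
            hdrop i hilen, hdrop _ (by omega)]
        exact hh i hi0 (by omega)
      · intro c hclen hcpar hcne hc0
        omega
    obtain ⟨hslen, hsheap, hsperm⟩ := siftup_spec l0 (by omega) hIu
    refine ⟨siftup l0 0, ?_, hsheap, ?_, ?_⟩
    · have hd0 : h.dropLast.getD 0 0 = h.getD 0 0 := hdrop 0 hrlen
      rw [hd0]
    · omega
    · refine (List.Perm.cons _ hsperm).trans ?_
      obtain ⟨t, ht⟩ : ∃ t, h.dropLast = h.getD 0 0 :: t := by
        cases hd : h.dropLast with
        | nil => rw [hd] at hrlen; simp at hrlen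
        | cons y t =>
          refine ⟨t, ?_⟩
          have hy : h.dropLast.getD 0 0 = y := by rw [hd]; rfl
          rw [← hdrop 0 hrlen, hy]
      have hl0' : l0 = lastelt :: t := by rw [hl0, ht]; rfl
      have hsplit : h = h.dropLast ++ [lastelt] := by
        have hc := List.dropLast_concat_getLast hne
        rw [List.getLast?_eq_getLast hne, Option.some_inj] at hlast
        rw [hlast] at hc
        exact hc.symm
      rw [hl0']
      nth_rewrite 2 [hsplit]
      rw [ht]
      simpa using List.Perm.cons (h.getD 0 0) (List.perm_append_singleton lastelt t).symm

theorem getD_eq_getElem (l : List Int) (i : Nat) (h : i < l.length) :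
    l.getD i 0 = l[i] := by
  simp [List.getD_eq_getElem?_getD, List.getElem?_eq_getElem h]

theorem heap_le_mem (h : List Int) (hh : IsHeap h) (x : Int) (hx : x ∈ h) :
    h.getD 0 0 ≤ x := by
  obtain ⟨i, hi, rfl⟩ := List.mem_iff_getElem.mp hx
  rw [← getD_eq_getElem h i hi]
  exact root_min h hh i hi

theorem root_mem (h : List Int) (hne : h ≠ []) : h.getD 0 0 ∈ h := by
  cases h with
  | nil => exact absurd rfl hne
  | cons a t => exact List.mem_cons_self

theorem cons_eraseIdx_perm (l : List Int) (k : Nat) (hk : k < l.length) :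
    (l[k] :: l.eraseIdx k).Perm l := by
  induction l generalizing k with
  | nil => simp at hk
  | cons x t ih =>
    cases k with
    | zero => simp
    | succ n =>
      have hn : n < t.length := by simpa using hk
      have e1 : (x :: t)[n + 1] :: (x :: t).eraseIdx (n + 1)
          = t[n] :: x :: t.eraseIdx n := by simp
      rw [e1]
      exact (List.Perm.swap x t[n] _).trans (List.Perm.cons x (ih n hn))

theorem takeMin_spec (p : List Int) (hne : p ≠ []) :
    ∃ m p', takeMin p = some (m, p') ∧ m ∈ p ∧ (∀ y ∈ p, m ≤ y) ∧
      (m :: p').Perm p ∧ p'.length + 1 = p.length := by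
  obtain ⟨m, hm⟩ : ∃ m, PySem.List.min? p (fun x => x) = some m := by
    cases hmin : PySem.List.min? p (fun x => x) with
    | none => exact absurd ((PySem.List.min?_eq_none_iff p (fun x => x)).mp hmin) hne
    | some m => exact ⟨m, rfl⟩
  have hmem : m ∈ p := PySem.List.min?_mem hm
  have hisMin : ∀ y ∈ p, m ≤ y := by
    intro y hy
    exact PySem.List.min?_isMin hm y hy
  obtain ⟨k, hk⟩ : ∃ k, PySem.List.index? p m = some k := by
    cases hidx : PySem.List.index? p m with
    | none => exact absurd hmem ((PySem.List.index?_eq_none_iff p m).mp hidx)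
    | some k => exact ⟨k, rfl⟩
  obtain ⟨hklen, hkm, -⟩ := PySem.List.getElem_of_index?_eq_some hk
  have hpop : PySem.List.pop? p (k : Int) = some (p[k], p.eraseIdx k) :=
    PySem.List.pop?_natCast p k hklen
  refine ⟨m, p.eraseIdx k, ?_, hmem, hisMin, ?_, ?_⟩
  · simp only [takeMin, hm, hk, hpop, hkm]
  · rw [← hkm]
    exact cons_eraseIdx_perm p k hklen
  · rw [List.length_eraseIdx_of_lt hklen]
    omega

theorem takeMin_nil : takeMin [] = none := rfl

theorem heappop_nil : heappop [] = none := rfl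

theorem step_match (h p : List Int) (hh : IsHeap h) (hperm : h.Perm p) :
    (stepA h = none ∧ stepB p = none) ∨
    ∃ h' p', stepA h = some h' ∧ stepB p = some p' ∧ IsHeap h' ∧ h'.Perm p' := by
  by_cases hpnil : p = []
  · subst hpnil
    have hnil : h = [] := hperm.eq_nil
    subst hnil
    exact Or.inl ⟨rfl, rfl⟩
  · have hhnil : h ≠ [] := by
      intro hx
      apply hpnil
      rw [hx] at hperm
      exact hperm.symm.eq_nil
    obtain ⟨h1, hpop1, hh1, hlen1, hperm1⟩ := heappop_spec h hh hhnil
    obtain ⟨m, p1, htm1, hmem1, hmin1, hpperm1, hplen1⟩ := takeMin_spec p hpnil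
    -- the two popped values are equal
    have hroot_in_p : h.getD 0 0 ∈ p := hperm.mem_iff.mp (root_mem h hhnil)
    have hm_in_h : m ∈ h := hperm.mem_iff.mpr hmem1
    have heq1 : h.getD 0 0 = m :=
      le_antisymm (heap_le_mem h hh m hm_in_h) (hmin1 _ hroot_in_p)
    have hperm1' : h1.Perm p1 := by
      have t1 : (h.getD 0 0 :: h1).Perm p := hperm1.trans hperm
      rw [heq1] at t1
      exact (t1.trans hpperm1.symm).cons_inv
    by_cases hp1nil : p1 = []
    · subst hp1nil
      have h1nil : h1 = [] := hperm1'.eq_nil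
      subst h1nil
      left
      constructor
      · simp only [stepA, hpop1, heappop_nil]
      · simp only [stepB, htm1, takeMin_nil]
    · have hh1nil : h1 ≠ [] := fun hx => hp1nil (by rw [hx] at hperm1'; exact hperm1'.symm.eq_nil)
      obtain ⟨h2, hpop2, hh2, hlen2, hperm2⟩ := heappop_spec h1 hh1 hh1nil
      obtain ⟨b, p2, htm2, hmem2, hmin2, hpperm2, hplen2⟩ := takeMin_spec p1 hp1nil
      have hroot_in_p1 : h1.getD 0 0 ∈ p1 := hperm1'.mem_iff.mp (root_mem h1 hh1nil)
      have hb_in_h1 : b ∈ h1 := hperm1'.mem_iff.mpr hmem2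
      have heq2 : h1.getD 0 0 = b :=
        le_antisymm (heap_le_mem h1 hh1 b hb_in_h1) (hmin2 _ hroot_in_p1)
      have hperm2' : h2.Perm p2 := by
        have t1 : (h1.getD 0 0 :: h2).Perm p1 := hperm2.trans hperm1'
        rw [heq2] at t1
        exact (t1.trans hpperm2.symm).cons_inv
      right
      rw [heq1] at hpop1
      rw [heq2] at hpop2
      refine ⟨heappush (heappush h2 (m + b)) (m + b), p2 ++ [m + b] ++ [m + b],
        ?_, ?_, ?_, ?_⟩
      · simp only [stepA, hpop1, hpop2]
      · simp only [stepB, htm1, htm2]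
      · exact heappush_heap _ _ (heappush_heap _ _ hh2)
      · have e1 : (heappush (heappush h2 (m + b)) (m + b)).Perm
            ((heappush h2 (m + b)) ++ [m + b]) := heappush_perm _ _
        have e2 : ((heappush h2 (m + b)) ++ [m + b]).Perm ((h2 ++ [m + b]) ++ [m + b]) :=
          (heappush_perm h2 (m + b)).append_right _
        have e3 : ((h2 ++ [m + b]) ++ [m + b]).Perm ((p2 ++ [m + b]) ++ [m + b]) :=
          (hperm2'.append_right _).append_right _
        exact (e1.trans e2).trans e3

theorem loop_match : ∀ (n : Nat) (h p : List Int), IsHeap h → h.Perm p →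
    (loopA n h = none ∧ loopB n p = none) ∨
    ∃ h' p', loopA n h = some h' ∧ loopB n p = some p' ∧ h'.Perm p' := by
  intro n
  induction n with
  | zero => intro h p hh hperm; exact Or.inr ⟨h, p, rfl, rfl, hperm⟩
  | succ n ih =>
    intro h p hh hperm
    rcases step_match h p hh hperm with ⟨e1, e2⟩ | ⟨h', p', e1, e2, hh', hperm'⟩
    · left
      constructor
      · simp only [loopA, e1]
      · simp only [loopB, e2]
    · have := ih h' p' hh' hperm'
      rcases this with ⟨f1, f2⟩ | ⟨h'', p'', f1, f2, hperm''⟩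
      · left
        constructor
        · simp only [loopA, e1, f1]
        · simp only [loopB, e2, f2]
      · right
        refine ⟨h'', p'', ?_, ?_, hperm''⟩
        · simp only [loopA, e1, f1]
        · simp only [loopB, e2, f2]

theorem isHeap_nil : IsHeap [] := by
  intro i hi0 hilen
  simp at hilen

theorem fold_push : ∀ (l acc : List Int), IsHeap acc →
    IsHeap (l.foldl (fun h x => heappush h x) acc) ∧
    (l.foldl (fun h x => heappush h x) acc).Perm (acc ++ l) := by
  intro l
  induction l with
  | nil => intro acc hacc; exact ⟨hacc, by simp⟩
  | cons x t ih =>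
    intro acc hacc
    obtain ⟨hh, hp⟩ := ih (heappush acc x) (heappush_heap acc x hacc)
    refine ⟨by simpa using hh, ?_⟩
    have e1 : ((heappush acc x) ++ t).Perm ((acc ++ [x]) ++ t) :=
      (heappush_perm acc x).append_right t
    have e2 : (acc ++ [x]) ++ t = acc ++ (x :: t) := by simp
    simpa [e2] using hp.trans (e1.trans (by rw [e2]))

theorem solution_eq (ability : List Int) (number : Int) :
    solution ability number = solution_alt ability number := by
  obtain ⟨hh, hp⟩ := fold_push ability [] isHeap_nil
  have hp' : (ability.foldl (fun h x => heappush h x) []).Perm ability := by simpa using hp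
  rcases loop_match number.toNat (ability.foldl (fun h x => heappush h x) []) ability hh hp'
    with ⟨e1, e2⟩ | ⟨h', p', e1, e2, hperm'⟩
  · simp only [solution, solution_alt, e1, e2]
  · simp only [solution, solution_alt, e1, e2]
    exact hperm'.sum_eq

-- ===== VERDICT (by name: the statement is the Claim_ definition above) =====
theorem solution_spec : Claim_equal_solution := by
  intro ability number _dom _pre
  exact solution_eq ability number
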